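-- pv_equiv track=rewrite | github.com/augustin-botoufu/revio-onboarding | app.py | _fleet_default_file_key
-- ===== SOURCE A (Python) =====
-- def _fleet_default_file_key(engine_files: dict) -> "str | None":
--     """Preselect the most likely « fichier client » file for the dialog.
--
--     Order of preference:
--     1. Slug == ``client_file`` (the intended source per spec)
--     2. Slug == ``autre_loueur_etat_parc`` (close enough, often used as fallback)
--     3. First file in the dict
--     """
--     if not engine_files:
--         return None
--     for preferred in ("client_file", "autre_loueur_etat_parc"):
--         for k, meta in engine_files.items():
--             if meta.get("slug") == preferred:
--                 return k
--     return next(iter(engine_files))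
-- ===== SOURCE B (Python) =====
-- def _fleet_default_file_key(engine_files: dict) -> "str | None":
--     """Single pass: record the first key per preferred slug and the first key
--     overall, then decide by priority."""
--     client = autre = first = None
--     for k, meta in engine_files.items():
--         slug = meta.get("slug")
--         if client is None and slug == "client_file":
--             client = k
--         if autre is None and slug == "autre_loueur_etat_parc":
--             autre = k
--         if first is None:
--             first = k
--     if client is not None:
--         return client
--     if autre is not None:
--         return autre
--     return first
-- ===== Notes on version B (the rewrite author's own statement) =====
-- stated objective: alternative
-- what changed: Replaces A's two priority-ordered rescans of the dict (plus a separate first-key extraction) by one single pass that records the first key per preferred slug and the first key overall, followed by a branch-free priority decision.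
import Mathlib
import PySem

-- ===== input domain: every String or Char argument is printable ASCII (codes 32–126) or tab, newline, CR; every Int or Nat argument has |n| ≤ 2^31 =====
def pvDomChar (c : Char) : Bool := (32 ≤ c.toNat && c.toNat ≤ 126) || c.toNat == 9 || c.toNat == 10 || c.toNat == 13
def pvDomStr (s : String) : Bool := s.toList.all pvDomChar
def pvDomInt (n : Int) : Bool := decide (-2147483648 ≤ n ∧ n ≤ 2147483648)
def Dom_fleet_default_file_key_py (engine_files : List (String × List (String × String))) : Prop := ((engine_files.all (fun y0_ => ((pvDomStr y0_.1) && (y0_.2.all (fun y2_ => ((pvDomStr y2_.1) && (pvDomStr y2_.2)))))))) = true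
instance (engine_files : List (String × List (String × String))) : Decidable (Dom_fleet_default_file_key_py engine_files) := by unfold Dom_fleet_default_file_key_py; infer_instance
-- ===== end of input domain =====

-- B restructures A: one pass recording the first key per preferred slug and the first key
-- overall, then a priority decision; same values everywhere (objective: alternative).

-- ===== PORT A =====
-- inner 'for k, meta in engine_files.items(): if meta.get("slug") == preferred: return k'
def pvFindSlugA (preferred : String) : List (String × List (String × String)) → Option String
  | [] => none
  | (k, m) :: rest =>
      if (PySem.Dict.mk m).get? "slug" = some preferred then some k
      else pvFindSlugA preferred rest

def fleet_default_file_key_py (engine_files : List (String × List (String × String))) : Option String :=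
  if engine_files = [] then none
  else
    -- for preferred in ("client_file", "autre_loueur_etat_parc"): (unrolled two-element tuple)
    match pvFindSlugA "client_file" engine_files with
    | some k => some k
    | none =>
      match pvFindSlugA "autre_loueur_etat_parc" engine_files with
      | some k => some k
      | none => engine_files.head?.map Prod.fst   -- next(iter(engine_files))

-- ===== PORT B =====
def pvStepB (st : Option String × Option String × Option String)
    (kv : String × List (String × String)) : Option String × Option String × Option String :=
  let slug := (PySem.Dict.mk kv.2).get? "slug"
  ((if st.1 = none ∧ slug = some "client_file" then some kv.1 else st.1),
   (if st.2.1 = none ∧ slug = some "autre_loueur_etat_parc" then some kv.1 else st.2.1),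
   (if st.2.2 = none then some kv.1 else st.2.2))

def fleet_default_file_key_py_alt (engine_files : List (String × List (String × String))) : Option String :=
  let st := engine_files.foldl pvStepB (none, none, none)
  match st.1 with
  | some k => some k
  | none =>
    match st.2.1 with
    | some k => some k
    | none => st.2.2

-- ===== PRECONDITION & SPEC =====
def Spec_fleet_default_file_key_py (engine_files : List (String × List (String × String))) (out : Option String) : Prop := out = fleet_default_file_key_py_alt engine_files
instance (engine_files : List (String × List (String × String))) (out : Option String) : Decidable (Spec_fleet_default_file_key_py engine_files out) := by unfold Spec_fleet_default_file_key_py; infer_instance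

-- ===== CLAIM (what is proved, stated in full; the proofs are below) =====
def Claim_equal_fleet_default_file_key_py : Prop := ∀ (engine_files : List (String × List (String × String))), Dom_fleet_default_file_key_py engine_files → Spec_fleet_default_file_key_py engine_files (fleet_default_file_key_py engine_files)

-- ===== LEMMAS AND PROOFS =====
def pvOr (a b : Option String) : Option String :=
  match a with
  | some x => some x
  | none => b

theorem pvFoldB_char (ef : List (String × List (String × String)))
    (st : Option String × Option String × Option String) :
    ef.foldl pvStepB st =
      (pvOr st.1 (pvFindSlugA "client_file" ef),
       pvOr st.2.1 (pvFindSlugA "autre_loueur_etat_parc" ef),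
       pvOr st.2.2 (ef.head?.map Prod.fst)) := by
  induction ef generalizing st with
  | nil =>
    obtain ⟨c, a, f⟩ := st
    cases c <;> cases a <;> cases f <;> simp [pvOr, pvFindSlugA]
  | cons kv rest ih =>
    obtain ⟨k, m⟩ := kv
    simp only [List.foldl_cons, ih]
    obtain ⟨c, a, f⟩ := st
    cases c <;> cases a <;> cases f <;>
      simp [pvStepB, pvFindSlugA, pvOr] <;>
      split_ifs <;> simp_all [pvOr]

-- ===== VERDICT (by name: the statement is the Claim_ definition above) =====
theorem fleet_default_file_key_py_spec : Claim_equal_fleet_default_file_key_py := by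
  intro ef _
  unfold Spec_fleet_default_file_key_py fleet_default_file_key_py fleet_default_file_key_py_alt
  rw [pvFoldB_char]
  cases ef with
  | nil => simp [pvFindSlugA, pvOr]
  | cons kv rest =>
    cases pvFindSlugA "client_file" (kv :: rest) <;>
    cases pvFindSlugA "autre_loueur_etat_parc" (kv :: rest) <;> rfl
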